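-- pv_equiv track=rewrite | github.com/Hackrrr/BakalariAPI | bakalari/utils.py | line_iterator
-- ===== SOURCE A (Python) =====
-- def line_iterator(text: str):
--     """Slouží jako iterátor řádek pro text. (Vypůjčeno (resp. ukradeno) ze Stacku.)"""
--     prevnl = -1
--     while True:
--         nextnl = text.find('\n', prevnl + 1)
--         if nextnl < 0:
--             break
--         yield text[prevnl + 1:nextnl]
--         prevnl = nextnl
-- ===== SOURCE B (Python) =====
-- def line_iterator(text: str):
--     """Yield each newline-terminated line of text (text after the last '\n' is not yielded)."""
--     for line in text.split('\n')[:-1]: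
--         yield line
-- ===== Notes on version B (the rewrite author's own statement) =====
-- stated objective: simpler
-- what changed: Replaces the index-tracking find/slice scanning loop with a single str.split('\n') that materializes all segments at once, then drops the final unterminated segment with [:-1].
import Mathlib
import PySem

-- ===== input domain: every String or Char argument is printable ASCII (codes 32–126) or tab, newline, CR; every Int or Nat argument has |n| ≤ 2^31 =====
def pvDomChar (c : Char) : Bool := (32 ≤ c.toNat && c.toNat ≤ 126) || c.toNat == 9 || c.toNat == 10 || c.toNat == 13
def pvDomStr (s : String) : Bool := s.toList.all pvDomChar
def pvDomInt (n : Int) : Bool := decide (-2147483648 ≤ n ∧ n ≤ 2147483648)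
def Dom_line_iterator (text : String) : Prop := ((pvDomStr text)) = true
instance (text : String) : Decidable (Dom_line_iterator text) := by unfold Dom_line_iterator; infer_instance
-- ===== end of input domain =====

-- B replaces A's index-tracking find/slice loop by one split('\n') followed by dropping the last segment ([:-1]); objective: simpler.

-- ===== PORT A =====
-- the while-True loop: fuel bounds the iteration count (each found newline is past the previous one, so length+1 steps always suffice)
def lineIterLoop (t : List Char) : Int → Nat → List String
  | _, 0 => []
  | prevnl, fuel + 1 =>
    let nextnl := PySem.Chars.findFrom t ['\n'] (prevnl + 1) none
    if nextnl < 0 then []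
    else String.mk (PySem.Chars.slice t (some (prevnl + 1)) (some nextnl)) ::
           lineIterLoop t nextnl fuel

def line_iterator (text : String) : List String :=
  lineIterLoop text.toList (-1) (text.toList.length + 1)

-- ===== PORT B =====
def line_iterator_alt (text : String) : List String :=
  PySem.List.slice ((PySem.Chars.splitOn text.toList ['\n']).map String.mk) none (some (-1))

-- ===== PRECONDITION & SPEC =====
def Spec_line_iterator (text : String) (out : List String) : Prop := out = line_iterator_alt text
instance (text : String) (out : List String) : Decidable (Spec_line_iterator text out) := by unfold Spec_line_iterator; infer_instance

-- ===== CLAIM (what is proved, stated in full; the proofs are below) =====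
def Claim_equal_line_iterator : Prop := ∀ (text : String), Dom_line_iterator text → Spec_line_iterator text (line_iterator text)

-- ===== LEMMAS AND PROOFS =====

-- reference decomposition: the '\n'-separated segments of a character list
def pvLines : List Char → List (List Char)
  | [] => [[]]
  | c :: rest => if c = '\n' then [] :: pvLines rest else (pvLines rest).modifyHead (c :: ·)

lemma pvLines_ne_nil (s : List Char) : pvLines s ≠ [] := by
  cases s with
  | nil => simp [pvLines]
  | cons c rest =>
    simp only [pvLines]
    split_ifs
    · simp
    · cases h : pvLines rest with
      | nil => exact absurd h (pvLines_ne_nil rest)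
      | cons a l => simp

lemma pvLines_no_nl (s : List Char) (h : '\n' ∉ s) : pvLines s = [s] := by
  induction s with
  | nil => rfl
  | cons c rest ih =>
    simp only [List.mem_cons, not_or] at h
    simp [pvLines, Ne.symm h.1, ih h.2]

lemma pvLines_first_nl (s : List Char) (j : Nat) (hj : s[j]? = some '\n')
    (hmin : ∀ i, i < j → s[i]? ≠ some '\n') :
    pvLines s = s.take j :: pvLines (s.drop (j + 1)) := by
  induction s generalizing j with
  | nil => simp at hj
  | cons c rest ih =>
    cases j with
    | zero =>
      simp only [List.getElem?_cons_zero, Option.some.injEq] at hj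
      simp [pvLines, hj]
    | succ j' =>
      have hc : c ≠ '\n' := by
        intro hc; exact hmin 0 (Nat.succ_pos _) (by simp [hc])
      have hj' : rest[j']? = some '\n' := by simpa using hj
      have hmin' : ∀ i, i < j' → rest[i]? ≠ some '\n' := by
        intro i hi
        have := hmin (i + 1) (by omega)
        simpa using this
      simp only [pvLines, hc, if_false]
      rw [ih j' hj' hmin']
      simp

-- split('\n') computes pvLines
lemma modifyHead_fun_id {α : Type} (l : List α) : List.modifyHead (fun x => x) l = l := by
  cases l <;> simp

lemma splitOn_go_spec (l : List Char) : ∀ (fuel : Nat) (cur : List Char) (acc : List (List Char)),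
    l.length ≤ fuel →
    PySem.Chars.splitOn.go ['\n'] fuel l cur acc
      = acc.reverse ++ (pvLines l).modifyHead (cur.reverse ++ ·) := by
  induction l with
  | nil =>
    intro fuel cur acc _
    cases fuel <;> simp [PySem.Chars.splitOn.go, pvLines]
  | cons c rest ih =>
    intro fuel cur acc hle
    cases fuel with
    | zero => simp at hle
    | succ f =>
      have hrest : rest.length ≤ f := by simpa using hle
      by_cases hc : c = '\n'
      · subst hc
        have h1 : PySem.Chars.splitOn.go ['\n'] (f + 1) ('\n' :: rest) cur acc
            = PySem.Chars.splitOn.go ['\n'] f rest [] (cur.reverse :: acc) := by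
          simp [PySem.Chars.splitOn.go, List.isPrefixOf]
        rw [h1, ih f [] (cur.reverse :: acc) hrest]
        simp [pvLines, modifyHead_fun_id]
      · have h1 : PySem.Chars.splitOn.go ['\n'] (f + 1) (c :: rest) cur acc
            = PySem.Chars.splitOn.go ['\n'] f rest (c :: cur) acc := by
          simp only [PySem.Chars.splitOn.go, List.isPrefixOf, Bool.and_eq_true, beq_iff_eq]
          rw [if_neg (by simp [Ne.symm hc])]
        rw [h1, ih f (c :: cur) acc hrest]
        simp only [pvLines, hc, if_false]
        cases h : pvLines rest with
        | nil => exact absurd h (pvLines_ne_nil rest)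
        | cons a tl => simp

lemma splitOn_eq_pvLines (s : List Char) :
    PySem.Chars.splitOn s ['\n'] = pvLines s := by
  have := splitOn_go_spec s (s.length + 1) [] [] (by omega)
  simpa [PySem.Chars.splitOn, modifyHead_fun_id] using this

-- a single-character prefix test on a suffix is a getElem? fact
lemma singleton_prefix_drop (s : List Char) (i : Nat) :
    ['\n'] <+: s.drop i ↔ s[i]? = some '\n' := by
  constructor
  · rintro ⟨u, hu⟩
    have h0 : (s.drop i)[0]? = some '\n' := by rw [← hu]; simp
    simpa [List.getElem?_drop] using h0
  · intro h
    have h0 : (s.drop i)[0]? = some '\n' := by simpa [List.getElem?_drop] using h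
    cases hd : s.drop i with
    | nil => simp [hd] at h0
    | cons a u =>
      rw [hd] at h0
      simp only [List.getElem?_cons_zero, Option.some.injEq] at h0
      exact ⟨u, by simp [h0]⟩

-- A's loop computes the initial segments of pvLines on the suffix past position k
lemma lineIterLoop_spec (t : List Char) : ∀ (fuel : Nat) (k : Nat), k ≤ t.length →
    t.length + 1 - k ≤ fuel →
    lineIterLoop t ((k : Int) - 1) fuel = ((pvLines (t.drop k)).map String.mk).dropLast := by
  intro fuel
  induction fuel with
  | zero => intro k hk hf; omega
  | succ f ih =>
    intro k hk hf
    simp only [lineIterLoop]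
    have hstart : ((k : Int) - 1) + 1 = (k : Int) := by ring
    rw [hstart, PySem.Chars.findFrom_natCast t ['\n'] k hk]
    by_cases hfind : PySem.Chars.find (t.drop k) ['\n'] = -1
    · rw [if_pos hfind, if_pos (by norm_num : (-1 : Int) < 0)]
      have hinf : ¬ ['\n'] <:+: t.drop k := (PySem.Chars.find_eq_neg_one_iff _ _).mp hfind
      have hisin : PySem.Chars.isIn ['\n'] (t.drop k) = false :=
        (PySem.Chars.isIn_eq_false_iff _ _).mpr hinf
      have hmem : '\n' ∉ t.drop k := by
        intro hm
        obtain ⟨i, hi, hv⟩ := List.mem_iff_getElem.mp hm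
        have hp : ['\n'] <+: (t.drop k).drop i :=
          (singleton_prefix_drop _ i).mpr (by simp [List.getElem?_eq_getElem hi, hv])
        have : PySem.Chars.isIn ['\n'] (t.drop k) = true :=
          (PySem.Chars.exists_prefix_drop_iff_isIn _ _).mp ⟨i, hp⟩
        simp [hisin] at this
      rw [pvLines_no_nl _ hmem]
      simp
    · rw [if_neg hfind]
      have hm1 := PySem.Chars.neg_one_le_find (t.drop k) ['\n']
      have hnn : 0 ≤ PySem.Chars.find (t.drop k) ['\n'] := by omega
      obtain ⟨hpref, hmin⟩ := PySem.Chars.find_spec (s := t.drop k) (sub := ['\n']) hnn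
      set j : Nat := (PySem.Chars.find (t.drop k) ['\n']).toNat with hjdef
      have hfj : PySem.Chars.find (t.drop k) ['\n'] = (j : Int) := by omega
      have hnl : (t.drop k)[j]? = some '\n' := (singleton_prefix_drop _ j).mp hpref
      obtain ⟨hjlt, -⟩ := List.getElem?_eq_some_iff.mp hnl
      have hklen : k + j + 1 ≤ t.length := by
        have := List.length_drop (l := t) (i := k) ▸ hjlt
        omega
      rw [hfj, if_neg (by omega : ¬ ((k : Int) + (j : Int) < 0))]
      have hslice : PySem.Chars.slice t (some (k : Int)) (some ((k : Int) + (j : Int)))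
          = (t.drop k).take j := by
        simp [PySem.Chars.slice_eq_listSlice, PySem.List.slice_natCast_add]
      have hrec : ((k : Int) + (j : Int)) = ((k + j + 1 : Nat) : Int) - 1 := by push_cast; ring
      rw [hslice, hrec, ih (k + j + 1) hklen (by omega)]
      have hmin' : ∀ i, i < j → (t.drop k)[i]? ≠ some '\n' := by
        intro i hi hcon
        exact hmin i hi ((singleton_prefix_drop _ i).mpr hcon)
      rw [pvLines_first_nl (t.drop k) j hnl hmin']
      have hdd : (t.drop k).drop (j + 1) = t.drop (k + j + 1) := by
        rw [List.drop_drop]; congr 1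
      have hne : ((pvLines (t.drop (k + j + 1))).map String.mk) ≠ [] := by
        simp [pvLines_ne_nil]
      rw [hdd]
      simp only [List.map_cons]
      rw [List.dropLast_cons_of_ne_nil hne]

-- ===== VERDICT (by name: the statement is the Claim_ definition above) =====
theorem line_iterator_spec : Claim_equal_line_iterator := by
  intro text _
  unfold Spec_line_iterator line_iterator line_iterator_alt
  rw [splitOn_eq_pvLines, PySem.List.slice_to_neg_one]
  have h := lineIterLoop_spec text.toList (text.toList.length + 1) 0 (by omega) (by omega)
  simpa using h
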